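-- pv_equiv track=rewrite | github.com/thuytran95/python-practice | PY01041_SO_TANG_GIAM.py | ktraTangGiam
-- ===== SOURCE A (Python) =====
-- def ktraTangGiam(s):
--     if len(s) < 3: return False
--     arr = list(int(el) for el in s)
--     up = True
--     for i in range(1, len(arr)):
--         # tim vi tri dau tien bat dau giam
--         # vd 12342=> i = 4
--         if up and arr[i - 1] >= arr[i]:
--             up = False
--         # dang down va tang tro lai
--         elif not up and arr[i- 1] <= arr[i]:
--             return False
--     return True
-- ===== SOURCE B (Python) =====
-- def ktraTangGiam(s):
--     if len(s) < 3:
--         return False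
--     digs = [int(c) for c in s]
--     # reduce to a comparison-symbol string over adjacent pairs, then pattern-check it:
--     # accepted iff it looks like  <* [>=] >*
--     t = ''.join('<' if a < b else '>' if a > b else '=' for a, b in zip(digs, digs[1:]))
--     tail = t.lstrip('<')
--     return set(tail[1:]) <= {'>'}
-- ===== Notes on version B (the rewrite author's own statement) =====
-- stated objective: alternative
-- what changed: B reduces the digit list to a comparison-symbol string over adjacent pairs and accepts iff that string matches <*[>=]>* (checked with lstrip and a set-inclusion test), instead of A's stateful index scan with an up/down mode flag.
import Mathlib
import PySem

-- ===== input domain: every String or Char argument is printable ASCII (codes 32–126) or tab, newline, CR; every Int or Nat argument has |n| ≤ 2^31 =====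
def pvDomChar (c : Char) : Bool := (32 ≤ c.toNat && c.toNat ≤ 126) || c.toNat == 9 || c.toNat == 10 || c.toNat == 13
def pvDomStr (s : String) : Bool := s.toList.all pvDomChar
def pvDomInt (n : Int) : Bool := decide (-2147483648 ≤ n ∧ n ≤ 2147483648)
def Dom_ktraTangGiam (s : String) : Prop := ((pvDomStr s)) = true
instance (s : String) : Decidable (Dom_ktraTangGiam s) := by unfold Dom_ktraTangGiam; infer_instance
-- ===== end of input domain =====

-- B reduces the digits to a comparison-symbol string of adjacent pairs and pattern-checks
-- it (<* [>=] >*) via lstrip/set, instead of A's stateful up/down-flag scan. Objective: alternative.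


-- ===== PORT A =====
-- arr = list(int(el) for el in s); exact on Pre_ (every char a digit, so int(c)
-- succeeds and the getD 0 default is never reached there)
def digitsA (s : String) : List Int :=
  s.toList.map (fun c => (PySem.Int.ofStr? (String.ofList [c])).getD 0)

-- the for-loop of A, with its running flag `up` (indices i are in range on every call)
def loopA (arr : List Int) (i : Nat) (up : Bool) : Bool :=
  if i < arr.length then
    if up && (arr[i-1]?.getD 0 ≥ arr[i]?.getD 0) then loopA arr (i + 1) false
    else if !up && (arr[i-1]?.getD 0 ≤ arr[i]?.getD 0) then false
    else loopA arr (i + 1) up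
  else true
termination_by arr.length - i

def ktraTangGiam (s : String) : Bool :=
  if s.toList.length < 3 then false
  else loopA (digitsA s) 1 true

-- ===== PORT B =====
def digitsB (s : String) : List Int :=
  s.toList.map (fun c => (PySem.Int.ofStr? (String.ofList [c])).getD 0)

-- '<' if a < b else '>' if a > b else '='
def sym (a b : Int) : Char := if a < b then '<' else if b < a then '>' else '='

-- t = ''.join(sym(a,b) for a, b in zip(digs, digs[1:]))  (digs[1:] = drop 1)
def cmpStr (arr : List Int) : List Char :=
  (arr.zip (arr.drop 1)).map (fun p => sym p.1 p.2)

def ktraTangGiam_alt (s : String) : Bool :=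
  if s.toList.length < 3 then false
  else
    let arr := digitsB s
    let t := cmpStr arr
    let tail := t.dropWhile (fun c => c == '<')   -- t.lstrip('<')
    (tail.drop 1).all (fun c => c == '>')         -- set(tail[1:]) <= {'>'}

-- ===== PRECONDITION & SPEC =====
-- Pre_ excludes exactly the inputs where Python A raises ValueError: a string of
-- length ≥ 3 with a non-digit character (int(el) fails).
def Pre_ktraTangGiam (s : String) : Prop :=
  s.toList.length < 3 ∨ s.toList.all Char.isDigit = true
instance (s : String) : Decidable (Pre_ktraTangGiam s) := by unfold Pre_ktraTangGiam; infer_instance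
def pvWitness_ktraTangGiam : String := "12321"

def Spec_ktraTangGiam (s : String) (out : Bool) : Prop := out = ktraTangGiam_alt s
instance (s : String) (out : Bool) : Decidable (Spec_ktraTangGiam s out) := by unfold Spec_ktraTangGiam; infer_instance

-- ===== CLAIM (what is proved, stated in full; the proofs are below) =====
def Claim_equal_ktraTangGiam : Prop := ∀ (s : String), Dom_ktraTangGiam s → Pre_ktraTangGiam s → Spec_ktraTangGiam s (ktraTangGiam s)

-- ===== LEMMAS AND PROOFS =====

theorem cmpStr_length (arr : List Int) : (cmpStr arr).length = arr.length - 1 := by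
  simp [cmpStr]

theorem cmpStr_drop_cons (arr : List Int) (i : Nat) (h1 : 1 ≤ i) (h2 : i < arr.length) :
    (cmpStr arr).drop (i - 1) =
      sym (arr[i-1]?.getD 0) (arr[i]?.getD 0) :: (cmpStr arr).drop i := by
  have hlt : i - 1 < (cmpStr arr).length := by rw [cmpStr_length]; omega
  rw [List.drop_eq_getElem_cons hlt]
  have hi1 : i - 1 < arr.length := by omega
  have : (cmpStr arr)[i-1] = sym (arr[i-1]?.getD 0) (arr[i]?.getD 0) := by
    simp [cmpStr, List.getElem_zip, hi1, h2,
      show i - 1 + 1 = i by omega]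
  rw [this, show i - 1 + 1 = i by omega]

theorem cmpStr_drop_nil (arr : List Int) (i : Nat) (h1 : 1 ≤ i) (h2 : ¬ i < arr.length) :
    (cmpStr arr).drop (i - 1) = [] := by
  apply List.drop_eq_nil_of_le; rw [cmpStr_length]; omega

-- with up = False, A's loop is the all-'>' check on the remaining symbols
theorem loopA_false (arr : List Int) : ∀ k i, 1 ≤ i → arr.length - i ≤ k →
    loopA arr i false = ((cmpStr arr).drop (i - 1)).all (fun c => c == '>') := by
  intro k
  induction k with
  | zero =>
    intro i h1 h
    have hi : ¬ i < arr.length := by omega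
    rw [loopA, if_neg hi, cmpStr_drop_nil arr i h1 hi]; simp
  | succ k ih =>
    intro i h1 h
    by_cases hi : i < arr.length
    · rw [loopA, if_pos hi, cmpStr_drop_cons arr i h1 hi]
      set a := arr[i-1]?.getD 0
      set b := arr[i]?.getD 0
      by_cases hle : a ≤ b
      · have hsym : (sym a b == '>') = false := by
          unfold sym; split_ifs with h' h'' <;> simp_all <;> omega
        simp [hle, hsym]
      · have hsym : (sym a b == '>') = true := by
          unfold sym; rw [if_neg (by omega), if_pos (by omega)]; rfl
        have hih := ih (i + 1) (by omega) (by omega)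
        rw [show (i + 1) - 1 = i by omega] at hih
        simp [hle, hsym, hih]
    · rw [loopA, if_neg hi, cmpStr_drop_nil arr i h1 hi]; simp

-- with up = True, A's loop equals B's lstrip-then-all composition
theorem loopA_true (arr : List Int) : ∀ k i, 1 ≤ i → arr.length - i ≤ k →
    loopA arr i true =
      ((((cmpStr arr).drop (i - 1)).dropWhile (fun c => c == '<')).drop 1).all
        (fun c => c == '>') := by
  intro k
  induction k with
  | zero =>
    intro i h1 h
    have hi : ¬ i < arr.length := by omega
    rw [loopA, if_neg hi, cmpStr_drop_nil arr i h1 hi]; simp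
  | succ k ih =>
    intro i h1 h
    by_cases hi : i < arr.length
    · rw [loopA, if_pos hi, cmpStr_drop_cons arr i h1 hi]
      set a := arr[i-1]?.getD 0
      set b := arr[i]?.getD 0
      by_cases hlt : a < b
      · -- '<' : dropWhile eats the head; the loop keeps climbing
        have hs : sym a b = '<' := by unfold sym; rw [if_pos hlt]
        have hge : ¬ a ≥ b := by omega
        simp only [hge, decide_false, Bool.and_false,
          Bool.not_true, Bool.false_and, hs, List.dropWhile_cons, beq_self_eq_true, if_true]
        rw [show i = (i + 1) - 1 by omega]
        exact ih (i + 1) (by omega) (by omega)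
      · -- '>' or '=' : dropWhile stops; drop 1 removes it; loop goes down-mode
        have hs : sym a b ≠ '<' := by
          unfold sym; split_ifs with h' <;> simp_all
        have hge : a ≥ b := by omega
        simp only [hge, decide_true, Bool.and_true, if_true,
          List.dropWhile_cons, beq_iff_eq, hs, if_false, List.drop_succ_cons, List.drop_zero]
        rw [show i = (i + 1) - 1 by omega]
        exact loopA_false arr (arr.length - (i + 1)) (i + 1) (by omega) (by omega)
    · rw [loopA, if_neg hi, cmpStr_drop_nil arr i h1 hi]; simp

-- ===== VERDICT (by name: the statement is the Claim_ definition above) =====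
theorem ktraTangGiam_spec : Claim_equal_ktraTangGiam := by
  intro s _ _
  unfold Spec_ktraTangGiam ktraTangGiam ktraTangGiam_alt
  by_cases h3 : s.toList.length < 3
  · rw [if_pos h3, if_pos h3]
  · rw [if_neg h3, if_neg h3]
    have hd : digitsB s = digitsA s := rfl
    simp only [hd]
    have := loopA_true (digitsA s) (digitsA s).length 1 (by omega) (by omega)
    simpa using this
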